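-- pv_equiv track=rewrite | github.com/Zenpyhr/Fashion_Bot | src/recommender/outfits.py | _build_role_item_lookup
-- ===== SOURCE A (Python) =====
-- def _build_role_item_lookup(pools: dict[str, list[dict]]) -> dict[str, dict[str, dict]]:
--     """role -> item_id -> full item dict (first wins)."""
--
--     out: dict[str, dict[str, dict]] = {}
--     for role, items in pools.items():
--         id_map: dict[str, dict] = {}
--         for item in items:
--             iid = item.get("item_id")
--             if iid is None:
--                 continue
--             sid = str(iid)
--             if sid not in id_map:
--                 id_map[sid] = item
--         out[role] = id_map
--     return out
-- ===== SOURCE B (Python) =====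
-- def _build_role_item_lookup(pools: dict[str, list[dict]]) -> dict[str, dict[str, dict]]:
--     """role -> item_id -> full item dict (first wins).
--
--     Two overwrite passes per role instead of a membership guard: collect the
--     (sid, item) pairs once, build the values by overwriting in reversed order
--     (so the earliest item wins), then rebuild forward so the keys keep their
--     first-occurrence order.
--     """
--     out: dict[str, dict[str, dict]] = {}
--     for role, items in pools.items():
--         pairs = [(str(iid), item)
--                  for item in items
--                  for iid in [item.get("item_id")]
--                  if iid is not None]
--         rev = dict(reversed(pairs))                      # earliest value wins
--         out[role] = {sid: rev[sid] for sid, _ in pairs}  # first-occurrence key order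
--     return out
-- ===== Notes on version B (the rewrite author's own statement) =====
-- stated objective: alternative
-- what changed: Replaces the per-item membership guard ('if sid not in id_map') with two guard-free overwrite passes: it collects (sid, item) pairs once, builds the values with dict(reversed(pairs)) so the earliest item wins by overwrite, then rebuilds forward so keys keep first-occurrence order.
import Mathlib
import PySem

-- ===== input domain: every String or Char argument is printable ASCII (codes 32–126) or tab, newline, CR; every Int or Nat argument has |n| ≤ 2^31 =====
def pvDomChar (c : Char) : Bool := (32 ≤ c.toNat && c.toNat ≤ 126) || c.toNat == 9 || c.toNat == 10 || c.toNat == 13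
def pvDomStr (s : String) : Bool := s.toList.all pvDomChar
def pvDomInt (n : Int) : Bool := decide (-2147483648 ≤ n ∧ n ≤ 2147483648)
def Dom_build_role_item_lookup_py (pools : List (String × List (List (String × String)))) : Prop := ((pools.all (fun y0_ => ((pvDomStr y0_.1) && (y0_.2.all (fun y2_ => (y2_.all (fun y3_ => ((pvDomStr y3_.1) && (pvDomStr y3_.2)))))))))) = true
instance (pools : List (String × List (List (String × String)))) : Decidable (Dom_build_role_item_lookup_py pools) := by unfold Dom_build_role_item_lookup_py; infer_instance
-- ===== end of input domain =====

-- B replaces A's per-item membership guard with two guard-free overwrite passes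
-- (values from a reversed pass, key order from a forward pass); alternative
-- decomposition, same cost. Return values only (no argument is mutated).

-- ===== PORT A =====
-- for item in items: iid = item.get("item_id"); if iid is None: continue;
-- sid = str(iid); if sid not in id_map: id_map[sid] = item
-- (str(iid) is the identity here: on this Lean type every value is already a String)
def pvAstep (m : PySem.Dict String (List (String × String))) (item : List (String × String)) :
    PySem.Dict String (List (String × String)) :=
  match (PySem.Dict.mk item).get? "item_id" with
  | none => m
  | some iid =>
    let sid := iid
    if m.contains sid then m else m.insert sid item

def build_role_item_lookup_py (pools : List (String × List (List (String × String)))) :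
    List (String × List (String × List (String × String))) :=
  (pools.foldl (fun out p =>
      out.insert p.1 ((p.2.foldl pvAstep PySem.Dict.empty).items))
    (PySem.Dict.empty : PySem.Dict String (List (String × List (String × String))))).items

-- ===== PORT B =====
-- pairs = [(str(iid), item) for item in items for iid in [item.get("item_id")] if iid is not None]
def pvPairs (items : List (List (String × String))) : List (String × List (String × String)) :=
  items.flatMap (fun item =>
    match (PySem.Dict.mk item).get? "item_id" with
    | none => []
    | some iid => [(iid, item)])

-- one step of {sid: rev[sid] for sid, _ in pairs}; rev[sid] cannot raise (every
-- sid in pairs is a key of rev), so the none branch is unreachable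
def pvBrebuild (rev : PySem.Dict String (List (String × String)))
    (m : PySem.Dict String (List (String × String))) (q : String × List (String × String)) :
    PySem.Dict String (List (String × String)) :=
  match rev.get? q.1 with
  | some v => m.insert q.1 v
  | none => m

def build_role_item_lookup_py_alt (pools : List (String × List (List (String × String)))) :
    List (String × List (String × List (String × String))) :=
  (pools.foldl (fun out p =>
      let pairs := pvPairs p.2
      let rev := PySem.Dict.ofList pairs.reverse
      out.insert p.1 ((pairs.foldl (pvBrebuild rev) PySem.Dict.empty).items))
    (PySem.Dict.empty : PySem.Dict String (List (String × List (String × String))))).items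

-- ===== PRECONDITION & SPEC =====
def Spec_build_role_item_lookup_py (pools : List (String × List (List (String × String)))) (out : List (String × List (String × List (String × String)))) : Prop := out = build_role_item_lookup_py_alt pools
instance (pools : List (String × List (List (String × String)))) (out : List (String × List (String × List (String × String)))) : Decidable (Spec_build_role_item_lookup_py pools out) := by unfold Spec_build_role_item_lookup_py; infer_instance

-- ===== CLAIM (what is proved, stated in full; the proofs are below) =====
def Claim_equal_build_role_item_lookup_py : Prop := ∀ (pools : List (String × List (List (String × String)))), Dom_build_role_item_lookup_py pools → Spec_build_role_item_lookup_py pools (build_role_item_lookup_py pools)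

-- ===== LEMMAS AND PROOFS =====

-- A's guarded insert, expressed on (sid, item) pairs
def pvGstep (m : PySem.Dict String (List (String × String))) (q : String × List (String × String)) :
    PySem.Dict String (List (String × String)) :=
  if m.contains q.1 then m else m.insert q.1 q.2

-- A's item loop is the guarded-insert fold over pvPairs
theorem pvAstep_fold_eq (items : List (List (String × String)))
    (m : PySem.Dict String (List (String × String))) :
    items.foldl pvAstep m = (pvPairs items).foldl pvGstep m := by
  induction items generalizing m with
  | nil => rfl
  | cons i t ih =>
    simp only [pvPairs, List.flatMap_cons, List.foldl_append, List.foldl_cons]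
    cases h : (PySem.Dict.mk i).get? "item_id" with
    | none => simpa [pvAstep, h, pvPairs] using ih m
    | some iid => simpa [pvAstep, pvGstep, h, pvPairs] using ih _

-- dict(reversed(l)) looks up the FIRST match of l
theorem pvOfList_reverse_get? {β : Type} (l : List (String × β)) (k : String) :
    (PySem.Dict.ofList l.reverse).get? k = List.lookup k l := by
  induction l with
  | nil => rfl
  | cons p t ih =>
    have : (PySem.Dict.ofList ((p :: t).reverse)) =
        (PySem.Dict.ofList t.reverse).insert p.1 p.2 := by
      simp [PySem.Dict.ofList, PySem.Dict.update, List.foldl_append]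
    rw [this, PySem.Dict.get?_insert, List.lookup]
    by_cases hk : k = p.1
    · simp [hk]
    · have hkb : (k == p.1) = false := by simpa [beq_iff_eq] using hk
      simp [hk, hkb, ih]

-- overwriting a present key with its current value changes nothing
theorem pvInsert_same {β : Type} (d : PySem.Dict String β) (k : String) (v : β)
    (hnd : d.keys.Nodup) (h : d.get? k = some v) : d.insert k v = d := by
  apply PySem.Dict.ext
  have hc : d.contains k = true := by
    rw [PySem.Dict.contains_eq_isSome_get?, h]; rfl
  rw [PySem.Dict.items_insert_of_contains d v hc]
  have hmap : ∀ p ∈ d.items,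
      (fun p => if (p.1 == k) = true then (k, v) else p) p = p := by
    intro p hp
    by_cases hk : p.1 = k
    · have : d.get? p.1 = some p.2 := PySem.Dict.get?_of_mem_items d hp hnd
      rw [hk, h] at this
      have hv : p.2 = v := by injection this.symm
      have hb : (p.1 == k) = true := by simp [hk]
      simp only [hb, if_true]
      exact Prod.ext hk.symm hv.symm
    · have : (p.1 == k) = false := by simpa [beq_iff_eq] using hk
      simp [this]
  calc List.map (fun p => if (p.1 == k) = true then (k, v) else p) d.items
      = d.items.map id := List.map_congr_left hmap
    _ = d.items := List.map_id _

-- core: the guarded fold and the rev-lookup fold agree, given the invariant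
-- that m is exactly the first-wins dict of the processed prefix
theorem pvLoop_eq (pairs : List (String × List (String × String))) :
    ∀ (suf pre : List (String × List (String × String)))
      (m : PySem.Dict String (List (String × String))),
      pairs = pre ++ suf → m.keys.Nodup →
      (∀ k, m.get? k = List.lookup k pre) →
      suf.foldl pvGstep m = suf.foldl (pvBrebuild (PySem.Dict.ofList pairs.reverse)) m := by
  intro suf
  induction suf with
  | nil => intro pre m _ _ _; rfl
  | cons q rest ih =>
    intro pre m hsplit hnd hinv
    have hrev : ∀ k, (PySem.Dict.ofList pairs.reverse).get? k = List.lookup k pairs :=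
      fun k => pvOfList_reverse_get? pairs k
    have hpairs : ∀ k, List.lookup k pairs = (List.lookup k pre).or (List.lookup k (q :: rest)) := by
      intro k; rw [hsplit, List.lookup_append]
    simp only [List.foldl_cons]
    cases hpre : List.lookup q.1 pre with
    | some w =>
      have hmq : m.get? q.1 = some w := by rw [hinv, hpre]
      have hc : m.contains q.1 = true := by
        rw [PySem.Dict.contains_eq_isSome_get?, hmq]; rfl
      have hA : pvGstep m q = m := by simp [pvGstep, hc]
      have hB : pvBrebuild (PySem.Dict.ofList pairs.reverse) m q = m := by
        have : (PySem.Dict.ofList pairs.reverse).get? q.1 = some w := by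
          rw [hrev, hpairs, hpre]; rfl
        simp only [pvBrebuild, this]
        exact pvInsert_same m q.1 w hnd hmq
      rw [hA, hB]
      refine ih (pre ++ [q]) m (by simp [hsplit]) hnd ?_
      intro k
      rw [List.lookup_append, hinv]
      cases hk : List.lookup k pre with
      | some u => rfl
      | none =>
        have hkq : (k == q.1) = false := by
          rw [beq_eq_false_iff_ne]
          intro he; simp [he, hpre] at hk
        simp only [List.lookup, hkq, Option.or_none]
    | none =>
      have hmq : m.get? q.1 = none := by rw [hinv, hpre]
      have hc : m.contains q.1 = false := by
        rw [PySem.Dict.contains_eq_isSome_get?, hmq]; rfl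
      have hA : pvGstep m q = m.insert q.1 q.2 := by simp [pvGstep, hc]
      have hB : pvBrebuild (PySem.Dict.ofList pairs.reverse) m q = m.insert q.1 q.2 := by
        have : (PySem.Dict.ofList pairs.reverse).get? q.1 = some q.2 := by
          rw [hrev, hpairs, hpre]; simp [List.lookup]
        simp [pvBrebuild, this]
      rw [hA, hB]
      refine ih (pre ++ [q]) (m.insert q.1 q.2) (by simp [hsplit])
        (PySem.Dict.nodup_keys_insert m q.1 q.2 hnd) ?_
      intro k
      rw [List.lookup_append, PySem.Dict.get?_insert]
      by_cases hk : k = q.1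
      · subst hk
        rw [hinv, hpre]
        simp [List.lookup]
      · have hkq : (k == q.1) = false := by
          simpa [beq_iff_eq] using hk
        rw [hinv]
        cases hkp : List.lookup k pre with
        | some u => simp [hk]
        | none => simp [hk, List.lookup, hkq]

-- per-role maps agree
theorem pvInner_eq (items : List (List (String × String))) :
    items.foldl pvAstep PySem.Dict.empty
      = (pvPairs items).foldl (pvBrebuild (PySem.Dict.ofList (pvPairs items).reverse))
          PySem.Dict.empty := by
  rw [pvAstep_fold_eq]
  exact pvLoop_eq (pvPairs items) (pvPairs items) [] PySem.Dict.empty rfl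
    PySem.Dict.nodup_keys_empty (fun k => by simp [PySem.Dict.get?_empty, List.lookup])

-- ===== VERDICT (by name: the statement is the Claim_ definition above) =====
theorem build_role_item_lookup_py_spec : Claim_equal_build_role_item_lookup_py := by
  intro pools _
  unfold Spec_build_role_item_lookup_py build_role_item_lookup_py build_role_item_lookup_py_alt
  congr 2
  funext out p
  rw [pvInner_eq]
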